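-- pv_equiv track=rewrite | github.com/saram098/hone | miner/arc/advanced_patterns.py | fill_interior
-- ===== SOURCE A (Python) =====
-- from typing import List, Dict, Optional, Tuple, Set
--
-- def fill_interior(grid: List[List[int]], fill_color: int = 1) -> List[List[int]]:
--     """Fill interior of shapes"""
--     result = [row[:] for row in grid]
--     h, w = len(grid), len(grid[0])
--
--     # Flood fill from edges to mark exterior
--     exterior = [[False] * w for _ in range(h)]
--
--     def flood_fill(i, j):
--         if i < 0 or i >= h or j < 0 or j >= w:
--             return
--         if exterior[i][j] or grid[i][j] != 0:
--             return
--
--         exterior[i][j] = True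
--         flood_fill(i+1, j)
--         flood_fill(i-1, j)
--         flood_fill(i, j+1)
--         flood_fill(i, j-1)
--
--     # Start from edges
--     for i in range(h):
--         flood_fill(i, 0)
--         flood_fill(i, w-1)
--     for j in range(w):
--         flood_fill(0, j)
--         flood_fill(h-1, j)
--
--     # Fill non-exterior zeros
--     for i in range(h):
--         for j in range(w):
--             if not exterior[i][j] and result[i][j] == 0:
--                 result[i][j] = fill_color
--
--     return result
-- ===== SOURCE B (Python) =====
-- def fill_interior(grid, fill_color=1):
--     """Fill interior of shapes (iterative: explicit stack instead of recursion,
--     exterior kept as a set of coordinates, output built by comprehension)."""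
--     h, w = len(grid), len(grid[0])
--     exterior = set()
--
--     def drain(si, sj):
--         stack = [(si, sj)]
--         while stack:
--             i, j = stack.pop()
--             if 0 <= i < h and 0 <= j < w and (i, j) not in exterior and grid[i][j] == 0:
--                 exterior.add((i, j))
--                 stack.extend(((i, j - 1), (i, j + 1), (i - 1, j), (i + 1, j)))
--
--     for i in range(h):
--         drain(i, 0)
--         drain(i, w - 1)
--     for j in range(w):
--         drain(0, j)
--         drain(h - 1, j)
--
--     return [[fill_color if j < w and x == 0 and (i, j) not in exterior else x
--              for j, x in enumerate(row)]
--             for i, row in enumerate(grid)]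
-- ===== Notes on version B (the rewrite author's own statement) =====
-- stated objective: alternative
-- what changed: The recursive flood fill over a 2D boolean matrix is replaced by an iterative DFS with an explicit stack over a set of exterior coordinates, and the copy-then-mutate output pass is replaced by a comprehension building the result directly.
import Mathlib
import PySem

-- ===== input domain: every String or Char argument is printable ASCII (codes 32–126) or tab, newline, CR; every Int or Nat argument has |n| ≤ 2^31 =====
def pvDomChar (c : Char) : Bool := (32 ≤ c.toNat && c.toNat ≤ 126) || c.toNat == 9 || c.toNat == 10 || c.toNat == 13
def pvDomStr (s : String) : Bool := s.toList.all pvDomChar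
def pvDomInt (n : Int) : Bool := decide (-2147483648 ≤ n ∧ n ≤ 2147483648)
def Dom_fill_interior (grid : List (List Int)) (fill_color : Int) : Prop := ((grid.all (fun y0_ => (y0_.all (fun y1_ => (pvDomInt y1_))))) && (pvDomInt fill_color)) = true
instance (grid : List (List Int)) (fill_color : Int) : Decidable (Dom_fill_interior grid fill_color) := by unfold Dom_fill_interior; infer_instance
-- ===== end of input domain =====

-- B replaces the recursive flood fill over a 2D boolean matrix by an iterative DFS with an
-- explicit stack over a set of exterior coordinates, and builds the result by comprehension
-- instead of copy-then-mutate (objective: alternative decomposition, same cost).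

-- ===== PORT A =====
-- grid[i][j], read only after the guards 0 <= i < h, 0 <= j < w have passed (exact there)
def pvCellAt (grid : List (List Int)) (i j : Int) : Int :=
  (grid.getD i.toNat []).getD j.toNat 0

-- A's 2D boolean matrix `exterior` is encoded by the list of coordinates that hold True
-- (exact: entries only ever go False -> True, and are read only through membership).
-- The recursion is totalised with a fuel guard (h*w+1 is always enough; the 0-branch is dead).
def floodA (grid : List (List Int)) (h w : Nat) :
    Nat → List (Int × Int) → Int → Int → List (Int × Int)
  | 0, ext, _, _ => ext
  | fuel+1, ext, i, j =>
    if i < 0 ∨ (h : Int) ≤ i ∨ j < 0 ∨ (w : Int) ≤ j then ext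
    else if (i, j) ∈ ext ∨ pvCellAt grid i j ≠ 0 then ext
    else
      let e1 := (i, j) :: ext
      let e2 := floodA grid h w fuel e1 (i+1) j
      let e3 := floodA grid h w fuel e2 (i-1) j
      let e4 := floodA grid h w fuel e3 i (j+1)
      floodA grid h w fuel e4 i (j-1)

def fill_interior (grid : List (List Int)) (fill_color : Int) : List (List Int) :=
  let h := grid.length
  let w := (grid.headD []).length
  let F := h * w + 1
  -- start from edges
  let ext1 := (List.range h).foldl
    (fun e i => floodA grid h w F (floodA grid h w F e (i : Int) 0) (i : Int) ((w : Int) - 1)) []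
  let ext := (List.range w).foldl
    (fun e j => floodA grid h w F (floodA grid h w F e 0 (j : Int)) ((h : Int) - 1) (j : Int)) ext1
  -- fill non-exterior zeros (result starts as a copy of grid, mutated in place)
  (List.range h).foldl (fun res (i : Nat) =>
    (List.range w).foldl (fun res (j : Nat) =>
      if ¬(((i : Int), (j : Int)) ∈ ext) ∧ (res.getD i []).getD j 1 = 0 then
        res.modify i (fun row => row.set j fill_color)
      else res) res) grid

-- ===== PORT B =====
-- the measure lemmas the stack loop's termination proof cites (in-range marked cells grow)
def pvAllCells (h w : Nat) : List (Int × Int) :=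
  (List.range h).flatMap (fun i => (List.range w).map (fun j => ((i : Int), (j : Int))))

def pvMeas (h w : Nat) (ext : List (Int × Int)) : Nat :=
  h * w - (pvAllCells h w).countP (fun p => decide (p ∈ ext))

theorem pv_countP_lt_of_mem {α : Type} {l : List α} {P Q : α → Bool}
    (hmono : ∀ x ∈ l, P x = true → Q x = true) {x : α} (hx : x ∈ l)
    (hPx : P x = false) (hQx : Q x = true) : l.countP P < l.countP Q := by
  induction l with
  | nil => cases hx
  | cons y t ih =>
    rcases List.mem_cons.1 hx with rfl | hxt
    · have hle : t.countP P ≤ t.countP Q :=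
        List.countP_mono_left (fun a ha => hmono a (List.mem_cons_of_mem _ ha))
      simp [hPx, hQx]; omega
    · have hlt : t.countP P < t.countP Q :=
        ih (fun a ha => hmono a (List.mem_cons_of_mem _ ha)) hxt
      have hy : (if P y then 1 else 0) ≤ (if Q y then 1 else 0) := by
        by_cases hp : P y = true
        · simp [hp, hmono y (List.mem_cons_self) hp]
        · simp [hp]
      simp only [List.countP_cons]
      omega

theorem pv_length_allCells (h w : Nat) : (pvAllCells h w).length = h * w := by
  simp [pvAllCells, List.length_flatMap, List.map_const']

theorem pv_mem_allCells {h w : Nat} {i j : Int}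
    (h1 : 0 ≤ i) (h2 : i < (h : Int)) (h3 : 0 ≤ j) (h4 : j < (w : Int)) :
    (i, j) ∈ pvAllCells h w := by
  have hi : i.toNat ∈ List.range h := List.mem_range.2 (by omega)
  have hj : j.toNat ∈ List.range w := List.mem_range.2 (by omega)
  have heq : ((i.toNat : Int), (j.toNat : Int)) = (i, j) := by
    simp [Int.toNat_of_nonneg h1, Int.toNat_of_nonneg h3]
  rw [pvAllCells, ← heq]
  simp only [List.mem_flatMap, List.mem_map]
  refine ⟨i.toNat, ?_, j.toNat, ?_, rfl⟩
  · simp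
    exact ⟨i.toNat, by omega, by omega⟩
  · simp
    exact ⟨j.toNat, by omega, by omega⟩

theorem pvMeas_mark_lt (h w : Nat) (ext : List (Int × Int)) (i j : Int)
    (h1 : 0 ≤ i) (h2 : i < (h : Int)) (h3 : 0 ≤ j) (h4 : j < (w : Int))
    (h5 : (i, j) ∉ ext) : pvMeas h w ((i, j) :: ext) < pvMeas h w ext := by
  have hlt : (pvAllCells h w).countP (fun p => decide (p ∈ ext)) <
      (pvAllCells h w).countP (fun p => decide (p ∈ (i, j) :: ext)) := by
    refine pv_countP_lt_of_mem (fun x _ hx => ?_) (pv_mem_allCells h1 h2 h3 h4)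
      (by simpa using h5) (by simp)
    simp only [decide_eq_true_eq] at *
    exact List.mem_cons_of_mem _ hx
  have hle : (pvAllCells h w).countP (fun p => decide (p ∈ (i, j) :: ext)) ≤ h * w := by
    simpa [pv_length_allCells] using List.countP_le_length
      (l := pvAllCells h w) (p := fun p => decide (p ∈ (i, j) :: ext))
  unfold pvMeas
  omega

-- iterative DFS: pop a cell, skip or mark-and-push-neighbours
def floodB (grid : List (List Int)) (h w : Nat)
    (ext : List (Int × Int)) (stack : List (Int × Int)) : List (Int × Int) :=
  match stack with
  | [] => ext
  | (i, j) :: rest =>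
    if hc : 0 ≤ i ∧ i < (h : Int) ∧ 0 ≤ j ∧ j < (w : Int) ∧ (i, j) ∉ ext ∧ pvCellAt grid i j = 0 then
      floodB grid h w ((i, j) :: ext) ((i+1, j) :: (i-1, j) :: (i, j+1) :: (i, j-1) :: rest)
    else
      floodB grid h w ext rest
termination_by (pvMeas h w ext, stack.length)
decreasing_by
  · exact Prod.Lex.left _ _ (pvMeas_mark_lt h w ext i j hc.1 hc.2.1 hc.2.2.1 hc.2.2.2.1 hc.2.2.2.2.1)
  · exact Prod.Lex.right _ (Nat.lt_succ_self _)

def drainB (grid : List (List Int)) (h w : Nat) (ext : List (Int × Int)) (si sj : Int) :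
    List (Int × Int) :=
  floodB grid h w ext [(si, sj)]

def fill_interior_alt (grid : List (List Int)) (fill_color : Int) : List (List Int) :=
  let h := grid.length
  let w := (grid.headD []).length
  let ext1 := (List.range h).foldl
    (fun e i => drainB grid h w (drainB grid h w e (i : Int) 0) (i : Int) ((w : Int) - 1)) []
  let ext := (List.range w).foldl
    (fun e j => drainB grid h w (drainB grid h w e 0 (j : Int)) ((h : Int) - 1) (j : Int)) ext1
  (PySem.List.enumerate grid 0).map (fun p =>
    (PySem.List.enumerate p.2 0).map (fun q =>
      if q.1 < (w : Int) ∧ q.2 = 0 ∧ ¬((p.1, q.1) ∈ ext) then fill_color else q.2))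

-- ===== PRECONDITION & SPEC =====
-- Pre_ excludes exactly the inputs where the Python A raises IndexError: the empty grid
-- (len(grid[0])), and grids with a row shorter than the first row (grid[i][j] in the flood fill).
def Pre_fill_interior (grid : List (List Int)) (fill_color : Int) : Prop :=
  grid ≠ [] ∧ ∀ row ∈ grid, (grid.headD []).length ≤ row.length
instance (grid : List (List Int)) (fill_color : Int) : Decidable (Pre_fill_interior grid fill_color) := by
  unfold Pre_fill_interior; infer_instance
def pvWitness_fill_interior : List (List Int) × Int := ([[1, 1, 1], [1, 0, 1], [1, 1, 1]], 2)

def Spec_fill_interior (grid : List (List Int)) (fill_color : Int) (out : List (List Int)) : Prop :=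
  out = fill_interior_alt grid fill_color
instance (grid : List (List Int)) (fill_color : Int) (out : List (List Int)) : Decidable (Spec_fill_interior grid fill_color out) := by
  unfold Spec_fill_interior; infer_instance

-- ===== CLAIM (what is proved, stated in full; the proofs are below) =====
def Claim_equal_fill_interior : Prop := ∀ (grid : List (List Int)) (fill_color : Int), Dom_fill_interior grid fill_color → Pre_fill_interior grid fill_color → Spec_fill_interior grid fill_color (fill_interior grid fill_color)


-- ===== LEMMAS AND PROOFS =====

-- floodA only ever prepends newly marked cells
theorem pv_floodA_extend (grid : List (List Int)) (h w : Nat) :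
    ∀ (f : Nat) (ext : List (Int × Int)) (i j : Int),
      ∃ pre, floodA grid h w f ext i j = pre ++ ext := by
  intro f
  induction f with
  | zero => intro ext i j; exact ⟨[], rfl⟩
  | succ f ih =>
    intro ext i j
    rw [floodA]
    split_ifs with g1 g2
    · exact ⟨[], rfl⟩
    · exact ⟨[], rfl⟩
    · obtain ⟨p1, hp1⟩ := ih ((i, j) :: ext) (i+1) j
      obtain ⟨p2, hp2⟩ := ih (floodA grid h w f ((i, j) :: ext) (i+1) j) (i-1) j
      obtain ⟨p3, hp3⟩ := ih (floodA grid h w f (floodA grid h w f ((i, j) :: ext) (i+1) j) (i-1) j) i (j+1)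
      obtain ⟨p4, hp4⟩ := ih (floodA grid h w f (floodA grid h w f (floodA grid h w f ((i, j) :: ext) (i+1) j) (i-1) j) i (j+1)) i (j-1)
      refine ⟨p4 ++ p3 ++ p2 ++ p1 ++ [(i, j)], ?_⟩
      rw [hp4, hp3, hp2, hp1]
      simp [List.append_assoc]

theorem pvMeas_append_le (h w : Nat) (pre ext : List (Int × Int)) :
    pvMeas h w (pre ++ ext) ≤ pvMeas h w ext := by
  have hc : (pvAllCells h w).countP (fun p => decide (p ∈ ext)) ≤
      (pvAllCells h w).countP (fun p => decide (p ∈ pre ++ ext)) := by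
    refine List.countP_mono_left (fun x _ hx => ?_)
    simp only [decide_eq_true_eq, List.mem_append] at *
    exact Or.inr hx
  unfold pvMeas
  omega

theorem pvMeas_floodA_le (grid : List (List Int)) (h w : Nat) (f : Nat)
    (ext : List (Int × Int)) (i j : Int) :
    pvMeas h w (floodA grid h w f ext i j) ≤ pvMeas h w ext := by
  obtain ⟨pre, hp⟩ := pv_floodA_extend grid h w f ext i j
  rw [hp]; exact pvMeas_append_le h w pre ext

-- the stack machine processes the top cell exactly like the recursive flood fill
theorem pv_floodB_cons (grid : List (List Int)) (h w : Nat) :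
    ∀ (n : Nat) (ext : List (Int × Int)) (i j : Int) (rest : List (Int × Int)) (f : Nat),
      pvMeas h w ext = n → n < f →
      floodB grid h w ext ((i, j) :: rest) = floodB grid h w (floodA grid h w f ext i j) rest := by
  intro n
  induction n using Nat.strong_induction_on with
  | _ n ih =>
    intro ext i j rest f hn hf
    obtain ⟨f', rfl⟩ : ∃ f', f = f' + 1 := ⟨f - 1, by omega⟩
    rw [floodB]
    by_cases hc : 0 ≤ i ∧ i < (h : Int) ∧ 0 ≤ j ∧ j < (w : Int) ∧ (i, j) ∉ ext ∧ pvCellAt grid i j = 0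
    · rw [dif_pos hc]
      obtain ⟨c1, c2, c3, c4, c5, c6⟩ := hc
      rw [floodA]
      rw [if_neg (by omega), if_neg (by simp [c5, c6])]
      have m1 : pvMeas h w ((i, j) :: ext) < n :=
        hn ▸ pvMeas_mark_lt h w ext i j c1 c2 c3 c4 c5
      set e1 := (i, j) :: ext with he1
      have m2 : pvMeas h w (floodA grid h w f' e1 (i+1) j) ≤ pvMeas h w e1 :=
        pvMeas_floodA_le grid h w f' e1 (i+1) j
      set e2 := floodA grid h w f' e1 (i+1) j with he2
      have m3 : pvMeas h w (floodA grid h w f' e2 (i-1) j) ≤ pvMeas h w e2 :=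
        pvMeas_floodA_le grid h w f' e2 (i-1) j
      set e3 := floodA grid h w f' e2 (i-1) j with he3
      have m4 : pvMeas h w (floodA grid h w f' e3 i (j+1)) ≤ pvMeas h w e3 :=
        pvMeas_floodA_le grid h w f' e3 i (j+1)
      set e4 := floodA grid h w f' e3 i (j+1) with he4
      rw [ih (pvMeas h w e1) m1 e1 (i+1) j _ f' rfl (by omega)]
      rw [ih (pvMeas h w e2) (by omega) e2 (i-1) j _ f' rfl (by omega)]
      rw [ih (pvMeas h w e3) (by omega) e3 i (j+1) _ f' rfl (by omega)]
      rw [ih (pvMeas h w e4) (by omega) e4 i (j-1) rest f' rfl (by omega)]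
    · rw [dif_neg hc]
      have hA : floodA grid h w (f' + 1) ext i j = ext := by
        rw [floodA]
        split_ifs with g1 g2
        · rfl
        · rfl
        · exfalso
          push Not at g2
          exact hc ⟨by omega, by omega, by omega, by omega, g2.1, g2.2⟩
      rw [hA]

-- draining a singleton stack is the recursive flood fill with ample fuel
theorem pv_drainB_eq (grid : List (List Int)) (h w : Nat) (ext : List (Int × Int)) (i j : Int) :
    drainB grid h w ext i j = floodA grid h w (h * w + 1) ext i j := by
  unfold drainB
  rw [pv_floodB_cons grid h w (pvMeas h w ext) ext i j [] (h * w + 1) rfl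
    (by unfold pvMeas; omega)]
  rw [floodB]

-- ---- final fill pass: nested index loop with in-place mutation = per-cell comprehension ----

theorem pv_modify_congr {α : Type} (l : List α) (i : Nat) (f g : α → α)
    (hfg : ∀ x, l[i]? = some x → f x = g x) : l.modify i f = l.modify i g := by
  apply List.ext_getElem?
  intro k
  simp only [List.getElem?_modify]
  cases hk : l[k]? with
  | none => simp
  | some x =>
    by_cases hik : i = k
    · subst hik; simp [hfg x hk]
    · simp [hik]

theorem pv_modify_modify {α : Type} (l : List α) (i : Nat) (f g : α → α) :
    (l.modify i f).modify i g = l.modify i (fun x => g (f x)) := by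
  apply List.ext_getElem?
  intro k
  simp only [List.getElem?_modify]
  cases l[k]? with
  | none => simp
  | some x => by_cases hik : i = k <;> simp [hik]

theorem pv_step_commute (ext : List (Int × Int)) (fill : Int) (i j : Nat)
    (res : List (List Int)) :
    (if ¬(((i : Int), (j : Int)) ∈ ext) ∧ (res.getD i []).getD j 1 = 0 then
        res.modify i (fun row => row.set j fill)
      else res)
    = res.modify i (fun row =>
        if ¬(((i : Int), (j : Int)) ∈ ext) ∧ row.getD j 1 = 0 then row.set j fill else row) := by
  by_cases hi : i < res.length
  · have hsome : res[i]? = some res[i] := List.getElem?_eq_getElem hi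
    have hrow : res.getD i [] = res[i] := by
      rw [List.getD_eq_getElem?_getD, hsome]; rfl
    by_cases hc : ¬(((i : Int), (j : Int)) ∈ ext) ∧ (res[i]).getD j 1 = 0
    · rw [if_pos (by rw [hrow]; exact hc)]
      refine pv_modify_congr res i _ _ (fun x hx => ?_)
      rw [hsome] at hx
      cases hx
      rw [if_pos hc]
    · rw [if_neg (by rw [hrow]; exact hc)]
      have hmc := pv_modify_congr res i
        (fun row => if ¬(((i : Int), (j : Int)) ∈ ext) ∧ row.getD j 1 = 0 then row.set j fill else row)
        id (fun x hx => by rw [hsome] at hx; cases hx; exact if_neg hc)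
      rw [hmc, List.modify_id]
  · have hrow : res.getD i [] = [] := by
      rw [List.getD_eq_getElem?_getD, List.getElem?_eq_none (by omega)]; rfl
    rw [if_neg (by rw [hrow]; simp), List.modify_eq_self (by omega)]

theorem pv_inner_fold (ext : List (Int × Int)) (fill : Int) (i : Nat) :
    ∀ (js : List Nat) (res : List (List Int)),
      js.foldl (fun res (j : Nat) =>
        if ¬(((i : Int), (j : Int)) ∈ ext) ∧ (res.getD i []).getD j 1 = 0 then
          res.modify i (fun row => row.set j fill)
        else res) res
      = res.modify i (fun row => js.foldl (fun row (j : Nat) =>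
          if ¬(((i : Int), (j : Int)) ∈ ext) ∧ row.getD j 1 = 0 then row.set j fill else row) row) := by
  intro js
  induction js with
  | nil =>
    intro res
    simp [show (fun row : List Int => row) = id from rfl, List.modify_id]
  | cons j js ih =>
    intro res
    simp only [List.foldl_cons]
    rw [pv_step_commute ext fill i j res, ih, pv_modify_modify]

theorem pv_rowFill_length (ext : List (Int × Int)) (fill : Int) (i : Nat) (W : Nat)
    (row : List Int) :
    ((List.range W).foldl (fun row (j : Nat) =>
      if ¬(((i : Int), (j : Int)) ∈ ext) ∧ row.getD j 1 = 0 then row.set j fill else row)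
      row).length = row.length := by
  induction W with
  | zero => rfl
  | succ W ih =>
    rw [List.range_succ, List.foldl_append, List.foldl_cons, List.foldl_nil]
    split_ifs
    · rw [List.length_set]; exact ih
    · exact ih

theorem pv_rowFill (ext : List (Int × Int)) (fill : Int) (i : Nat) :
    ∀ (W : Nat) (row : List Int) (k : Nat),
      ((List.range W).foldl (fun row (j : Nat) =>
        if ¬(((i : Int), (j : Int)) ∈ ext) ∧ row.getD j 1 = 0 then row.set j fill else row)
        row)[k]?
      = (fun x => if k < W ∧ ¬(((i : Int), (k : Int)) ∈ ext) ∧ x = 0 then fill else x) <$> row[k]? := by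
  intro W
  induction W with
  | zero =>
    intro row k
    simp only [List.range_zero, List.foldl_nil]
    cases row[k]? with
    | none => rfl
    | some x => simp
  | succ W ih =>
    intro row k
    rw [List.range_succ, List.foldl_append, List.foldl_cons, List.foldl_nil]
    have hRW : ((List.range W).foldl (fun row (j : Nat) =>
        if ¬(((i : Int), (j : Int)) ∈ ext) ∧ row.getD j 1 = 0 then row.set j fill else row)
        row)[W]? = row[W]? := by
      rw [ih row W]
      cases row[W]? with
      | none => rfl
      | some x => simp
    have hgd : ((List.range W).foldl (fun row (j : Nat) =>
        if ¬(((i : Int), (j : Int)) ∈ ext) ∧ row.getD j 1 = 0 then row.set j fill else row)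
        row).getD W 1 = row.getD W 1 := by
      rw [List.getD_eq_getElem?_getD, List.getD_eq_getElem?_getD, hRW]
    split_ifs with hc
    · rw [List.getElem?_set]
      by_cases hkW : W = k
      · subst hkW
        rw [if_pos rfl, pv_rowFill_length]
        by_cases hlen : W < row.length
        · rw [if_pos hlen]
          have hsome : row[W]? = some row[W] := List.getElem?_eq_getElem hlen
          rw [hsome]
          have hz : row[W] = 0 := by
            have h2 := hc.2
            rw [hgd, List.getD_eq_getElem?_getD, hsome] at h2
            exact h2
          simp only [Option.map_eq_map, Option.map_some]
          rw [if_pos ⟨by omega, hc.1, hz⟩]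
        · rw [if_neg hlen, List.getElem?_eq_none (by omega)]
          rfl
      · rw [if_neg hkW, ih row k]
        cases row[k]? with
        | none => rfl
        | some x =>
          simp only [Option.map_eq_map, Option.map_some, Option.some.injEq]
          by_cases hx : k < W ∧ ¬(((i : Int), (k : Int)) ∈ ext) ∧ x = 0
          · rw [if_pos hx, if_pos ⟨by omega, hx.2⟩]
          · rw [if_neg hx, if_neg (by rintro ⟨h1, h2⟩; exact hx ⟨by omega, h2⟩)]
    · rw [ih row k]
      cases hrk : row[k]? with
      | none => rfl
      | some x =>
        simp only [Option.map_eq_map, Option.map_some, Option.some.injEq]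
        by_cases hkW : k = W
        · subst hkW
          rw [if_neg (by omega), if_neg ?_]
          rintro ⟨-, h2, h3⟩
          apply hc
          refine ⟨h2, ?_⟩
          rw [hgd, List.getD_eq_getElem?_getD, hrk]
          exact h3
        · by_cases hx : k < W ∧ ¬(((i : Int), (k : Int)) ∈ ext) ∧ x = 0
          · rw [if_pos hx, if_pos ⟨by omega, hx.2⟩]
          · rw [if_neg hx, if_neg (by rintro ⟨h1, h2⟩; exact hx ⟨by omega, h2⟩)]

theorem pv_outer_fold (g : Nat → List Int → List Int) :
    ∀ (n : Nat) (res : List (List Int)) (k : Nat),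
      ((List.range n).foldl (fun r (i : Nat) => r.modify i (g i)) res)[k]?
      = if k < n then (g k) <$> res[k]? else res[k]? := by
  intro n
  induction n with
  | zero => intro res k; simp
  | succ n ih =>
    intro res k
    rw [List.range_succ, List.foldl_append, List.foldl_cons, List.foldl_nil,
      List.getElem?_modify, ih]
    by_cases hkn : k < n
    · rw [if_pos hkn, if_pos (by omega)]
      cases res[k]? <;> simp [show n ≠ k by omega]
    · rw [if_neg hkn]
      by_cases hk : n = k
      · subst hk
        rw [if_pos (by omega)]
        cases res[n]? <;> simp
      · rw [if_neg (by omega)]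
        cases res[k]? <;> simp [hk]

-- the whole final pass, both shapes
theorem pv_fill_eq (ext : List (Int × Int)) (fill : Int) (grid : List (List Int)) (W : Nat) :
    (List.range grid.length).foldl (fun res (i : Nat) =>
      (List.range W).foldl (fun res (j : Nat) =>
        if ¬(((i : Int), (j : Int)) ∈ ext) ∧ (res.getD i []).getD j 1 = 0 then
          res.modify i (fun row => row.set j fill)
        else res) res) grid
    = (PySem.List.enumerate grid 0).map (fun p =>
        (PySem.List.enumerate p.2 0).map (fun q =>
          if q.1 < (W : Int) ∧ q.2 = 0 ∧ ¬((p.1, q.1) ∈ ext) then fill else q.2)) := by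
  have hfold : (List.range grid.length).foldl (fun res (i : Nat) =>
      (List.range W).foldl (fun res (j : Nat) =>
        if ¬(((i : Int), (j : Int)) ∈ ext) ∧ (res.getD i []).getD j 1 = 0 then
          res.modify i (fun row => row.set j fill)
        else res) res) grid
      = (List.range grid.length).foldl (fun r (i : Nat) => r.modify i (fun row =>
          (List.range W).foldl (fun row (j : Nat) =>
            if ¬(((i : Int), (j : Int)) ∈ ext) ∧ row.getD j 1 = 0 then row.set j fill else row)
            row)) grid := by
    have hfun : (fun (res : List (List Int)) (i : Nat) =>
        (List.range W).foldl (fun res (j : Nat) =>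
          if ¬(((i : Int), (j : Int)) ∈ ext) ∧ (res.getD i []).getD j 1 = 0 then
            res.modify i (fun row => row.set j fill)
          else res) res)
        = (fun (res : List (List Int)) (i : Nat) => res.modify i (fun row =>
            (List.range W).foldl (fun row (j : Nat) =>
              if ¬(((i : Int), (j : Int)) ∈ ext) ∧ row.getD j 1 = 0 then row.set j fill else row)
              row)) := by
      funext res i
      exact pv_inner_fold ext fill i (List.range W) res
    rw [hfun]
  rw [hfold]
  apply List.ext_getElem?
  intro k
  rw [pv_outer_fold]
  have hB : ((PySem.List.enumerate grid 0).map (fun p =>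
      (PySem.List.enumerate p.2 0).map (fun q =>
        if q.1 < (W : Int) ∧ q.2 = 0 ∧ ¬((p.1, q.1) ∈ ext) then fill else q.2)))[k]?
      = (fun row => (PySem.List.enumerate row 0).map (fun q =>
          if q.1 < (W : Int) ∧ q.2 = 0 ∧ ¬((((k : Nat) : Int), q.1) ∈ ext) then fill else q.2)) <$> grid[k]? := by
    rw [List.getElem?_map, PySem.List.getElem?_enumerate]
    cases grid[k]? with
    | none => rfl
    | some row => simp
  rw [hB]
  by_cases hk : k < grid.length
  · rw [if_pos hk]
    have hrowk : grid[k]? = some grid[k] := List.getElem?_eq_getElem hk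
    rw [hrowk]
    simp only [Option.map_eq_map, Option.map_some, Option.some.injEq]
    apply List.ext_getElem?
    intro m
    rw [pv_rowFill, List.getElem?_map, PySem.List.getElem?_enumerate]
    cases hgm : (grid[k])[m]? with
    | none => rfl
    | some x =>
      simp only [Option.map_eq_map, Option.map_some, Option.some.injEq]
      by_cases hx : m < W ∧ ¬(((k : Int), (m : Int)) ∈ ext) ∧ x = 0
      · rw [if_pos hx, if_pos ⟨by omega, hx.2.2, by simpa using hx.2.1⟩]
      · rw [if_neg hx, if_neg ?_]
        rintro ⟨h1, h2, h3⟩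
        exact hx ⟨by omega, by simpa using h3, h2⟩
  · rw [if_neg hk, List.getElem?_eq_none (show grid.length ≤ k by omega)]
    rfl

-- ===== VERDICT (by name: the statement is the Claim_ definition above) =====
theorem fill_interior_spec : Claim_equal_fill_interior := by
  unfold Claim_equal_fill_interior
  intro grid fill_color _hdom _hpre
  unfold Spec_fill_interior
  show fill_interior grid fill_color = fill_interior_alt grid fill_color
  simp only [fill_interior, fill_interior_alt, pv_drainB_eq]
  exact pv_fill_eq _ fill_color grid (grid.headD []).length
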